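-- pv_equiv track=rewrite | github.com/DragunWF/Competitive-Programming | python/4_kyu/sudoku_validator.py | get_quarter_blocks
-- ===== SOURCE A (Python) =====
-- def get_quarter_blocks(quarter: list) -> list:
--     blocks, block = [], []
--     for i in range(len(quarter)):
--         for j in range(3):  # 3x3 block
--             block.append(quarter[j][i])
--         if ((i + 1) % 3) == 0:
--             blocks.append(block)
--             block = []
--     return blocks
-- ===== SOURCE B (Python) =====
-- def get_quarter_blocks(quarter: list) -> list:
--     flat = [quarter[j][i] for i in range(len(quarter)) for j in range(3)]
--     return [flat[k:k + 9] for k in range(0, len(flat), 9) if k + 9 <= len(flat)]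
-- ===== Notes on version B (the rewrite author's own statement) =====
-- stated objective: alternative
-- what changed: B replaces A's single interleaved loop with a (i+1)%3-triggered flush of a running block accumulator by two independent phases: first flatten the three rows column-major into one list, then slice that list into complete chunks of nine.
import Mathlib
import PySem

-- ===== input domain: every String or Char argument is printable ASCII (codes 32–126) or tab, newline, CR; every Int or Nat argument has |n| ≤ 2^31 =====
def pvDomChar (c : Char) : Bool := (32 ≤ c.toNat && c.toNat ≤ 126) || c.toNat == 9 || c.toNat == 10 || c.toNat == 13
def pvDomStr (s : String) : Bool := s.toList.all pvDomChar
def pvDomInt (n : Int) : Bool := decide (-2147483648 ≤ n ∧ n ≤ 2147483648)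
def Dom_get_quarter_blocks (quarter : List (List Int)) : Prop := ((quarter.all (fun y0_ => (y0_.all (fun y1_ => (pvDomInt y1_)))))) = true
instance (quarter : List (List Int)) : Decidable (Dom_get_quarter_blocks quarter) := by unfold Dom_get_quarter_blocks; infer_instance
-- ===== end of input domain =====

-- B flattens the three rows column-major in one pass and then slices complete 9-chunks,
-- instead of A's interleaved accumulate-and-flush on (i+1)%3; same values everywhere A returns.

-- ===== PORT A =====
def get_quarter_blocks (quarter : List (List Int)) : List (List Int) :=
  ((PySem.List.pyRange 0 (quarter.length : Int) 1).foldl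
      (fun (st : List (List Int) × List Int) i =>
        let block := (PySem.List.pyRange 0 3 1).foldl
          (fun b j => b ++ [((PySem.List.pyGet? ((PySem.List.pyGet? quarter j).getD []) i)).getD 0]) st.2
        if PySem.Int.mod (i + 1) 3 = 0 then (st.1 ++ [block], []) else (st.1, block))
      ([], [])).1

-- ===== PORT B =====
def get_quarter_blocks_alt (quarter : List (List Int)) : List (List Int) :=
  let flat : List Int := (PySem.List.pyRange 0 (quarter.length : Int) 1).foldl
    (fun acc i => acc ++ (PySem.List.pyRange 0 3 1).map
      (fun j => ((PySem.List.pyGet? ((PySem.List.pyGet? quarter j).getD []) i)).getD 0)) []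
  (PySem.List.pyRange 0 (flat.length : Int) 9).foldl
    (fun acc k => if k + 9 ≤ (flat.length : Int) then acc ++ [PySem.List.slice flat (some k) (some (k + 9))] else acc) []

-- ===== PRECONDITION & SPEC =====
-- Pre_ excludes exactly the inputs where Python A raises IndexError: a nonempty quarter with
-- fewer than 3 rows, or one of the first 3 rows shorter than len(quarter).
def Pre_get_quarter_blocks (quarter : List (List Int)) : Prop :=
  quarter = [] ∨ (3 ≤ quarter.length ∧ ∀ row ∈ quarter.take 3, quarter.length ≤ row.length)
instance (quarter : List (List Int)) : Decidable (Pre_get_quarter_blocks quarter) := by unfold Pre_get_quarter_blocks; infer_instance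
def pvWitness_get_quarter_blocks : List (List Int) := [[1,2,3],[4,5,6],[7,8,9]]

def Spec_get_quarter_blocks (quarter : List (List Int)) (out : List (List Int)) : Prop := out = get_quarter_blocks_alt quarter
instance (quarter : List (List Int)) (out : List (List Int)) : Decidable (Spec_get_quarter_blocks quarter out) := by unfold Spec_get_quarter_blocks; infer_instance

-- ===== CLAIM (what is proved, stated in full; the proofs are below) =====
def Claim_equal_get_quarter_blocks : Prop := ∀ (quarter : List (List Int)), Dom_get_quarter_blocks quarter → Pre_get_quarter_blocks quarter → Spec_get_quarter_blocks quarter (get_quarter_blocks quarter)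


-- ===== LEMMAS AND PROOFS =====

-- proof-only helpers (not reachable from Spec_/Pre_/Claim_ definitions)
def pvElem (quarter : List (List Int)) (i j : Int) : Int :=
  (PySem.List.pyGet? ((PySem.List.pyGet? quarter j).getD []) i).getD 0

def pvCol (quarter : List (List Int)) (i : Int) : List Int :=
  [pvElem quarter i 0, pvElem quarter i 1, pvElem quarter i 2]

def pvStep (c : Int → List Int) (st : List (List Int) × List Int) (i : Int) :
    List (List Int) × List Int :=
  if PySem.Int.mod (i + 1) 3 = 0 then (st.1 ++ [st.2 ++ c i], []) else (st.1, st.2 ++ c i)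

def pvBlock (c : Int → List Int) (t : Nat) : List Int :=
  c (3 * t) ++ (c ((3 * t : Nat) + 1) ++ c ((3 * t : Nat) + 2))

lemma pvRange3 : PySem.List.pyRange 0 3 1 = [0, 1, 2] := by decide

lemma pvRange_a3 (a : Int) : PySem.List.pyRange a (a + 3) 1 = [a, a + 1, a + 2] := by
  rw [PySem.List.pyRange_one_cons (by omega), PySem.List.pyRange_one_cons (by omega),
      PySem.List.pyRange_one_cons (by omega), PySem.List.pyRange_one_eq_nil (by omega)]
  simp; omega

lemma pvMod3 (a : Int) : PySem.Int.mod a 3 = a % 3 :=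
  PySem.Int.mod_eq_emod_of_pos (by norm_num)

-- A's loop body equals pvStep
lemma pvA_norm (quarter : List (List Int)) :
    get_quarter_blocks quarter =
      ((PySem.List.pyRange 0 (quarter.length : Int) 1).foldl
        (pvStep (pvCol quarter)) ([], [])).1 := by
  unfold get_quarter_blocks
  congr 1
  apply PySem.List.foldl_congr_mem
  intro acc x _
  simp [pvRange3, List.foldl, pvStep, pvCol, pvElem]

-- the full-triple prefix of A's loop
lemma pvAloop (c : Int → List Int) (q : Nat) (bs : List (List Int)) :
    (PySem.List.pyRange 0 ((3 * q : Nat) : Int) 1).foldl (pvStep c) (bs, []) =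
      (bs ++ (List.range q).map (pvBlock c), []) := by
  induction q generalizing bs with
  | zero => simp
  | succ q ih =>
      have hsplit : PySem.List.pyRange 0 ((3 * (q + 1) : Nat) : Int) 1 =
          PySem.List.pyRange 0 ((3 * q : Nat) : Int) 1 ++
          PySem.List.pyRange ((3 * q : Nat) : Int) (((3 * q : Nat) : Int) + 3) 1 := by
        rw [show (((3 * q : Nat) : Int) + 3) = ((3 * (q + 1) : Nat) : Int) by push_cast; ring]
        exact PySem.List.pyRange_one_append _ _ _ (by positivity) (by push_cast; omega)
      rw [hsplit, List.foldl_append, ih, pvRange_a3]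
      have h1 : ¬ PySem.Int.mod (((3 * q : Nat) : Int) + 1) 3 = 0 := by
        rw [pvMod3]; omega
      have h2 : ¬ PySem.Int.mod ((((3 * q : Nat) : Int) + 1) + 1) 3 = 0 := by
        rw [pvMod3]; omega
      have h3 : PySem.Int.mod ((((3 * q : Nat) : Int) + 2) + 1) 3 = 0 := by
        rw [pvMod3]; omega
      simp only [List.foldl_cons, List.foldl_nil, pvStep]
      rw [if_neg h1, if_neg h2, if_pos h3]
      have hb : pvBlock c q = c ((3 * q : Nat) : Int) ++
          (c (((3 * q : Nat) : Int) + 1) ++ c (((3 * q : Nat) : Int) + 2)) := by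
        simp only [pvBlock]
        push_cast
        rfl
      dsimp only
      simp [List.range_succ, hb, List.append_assoc]

-- A's result for any n: the trailing partial columns never flush
lemma pvA_eval (c : Int → List Int) (n : Nat) :
    ((PySem.List.pyRange 0 (n : Int) 1).foldl (pvStep c) ([], [])).1 =
      (List.range (n / 3)).map (pvBlock c) := by
  have hq : 3 * (n / 3) ≤ n := by omega
  have hsplit : PySem.List.pyRange 0 (n : Int) 1 =
      PySem.List.pyRange 0 ((3 * (n / 3) : Nat) : Int) 1 ++
      PySem.List.pyRange ((3 * (n / 3) : Nat) : Int) (n : Int) 1 :=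
    PySem.List.pyRange_one_append _ _ _ (by positivity) (by exact_mod_cast hq)
  rw [hsplit, List.foldl_append, pvAloop, List.nil_append]
  have hr : n % 3 = 0 ∨ n % 3 = 1 ∨ n % 3 = 2 := by omega
  rcases hr with h | h | h
  · rw [PySem.List.pyRange_one_eq_nil (by exact_mod_cast (by omega : n ≤ 3 * (n / 3)))]
    simp
  · have : (n : Int) = ((3 * (n / 3) : Nat) : Int) + 1 := by push_cast; omega
    rw [this, PySem.List.pyRange_one_singleton]
    have h1 : ¬ PySem.Int.mod (((3 * (n / 3) : Nat) : Int) + 1) 3 = 0 := by rw [pvMod3]; omega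
    simp only [List.foldl_cons, List.foldl_nil, pvStep]
    rw [if_neg h1]
  · have : (n : Int) = (((3 * (n / 3) : Nat) : Int) + 1) + 1 := by push_cast; omega
    rw [this, PySem.List.pyRange_one_succ_right (by omega),
        PySem.List.pyRange_one_singleton]
    have h1 : ¬ PySem.Int.mod (((3 * (n / 3) : Nat) : Int) + 1) 3 = 0 := by rw [pvMod3]; omega
    have h2 : ¬ PySem.Int.mod ((((3 * (n / 3) : Nat) : Int) + 1) + 1) 3 = 0 := by
      rw [pvMod3]; omega
    rw [List.foldl_append]
    simp only [List.foldl_cons, List.foldl_nil, pvStep]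
    rw [if_neg h1, if_neg h2]

-- length of the flattened column-major list
lemma pvFlat_len (c : Nat → List Int) (h : ∀ i, (c i).length = 3) (l : List Nat) :
    (l.flatMap c).length = 3 * l.length := by
  rw [List.length_flatMap]
  have : l.map (fun a => (c a).length) = l.map (fun _ => 3) := List.map_congr_left (by simp [h])
  rw [this, List.map_const', List.sum_replicate, smul_eq_mul]
  omega

-- the k-th complete 9-chunk of the flattened list
lemma pvChunk (c : Nat → List Int) (h : ∀ i, (c i).length = 3) (n k : Nat)
    (hk : 3 * (k + 1) ≤ n) :
    (((List.range n).flatMap c).drop (9 * k)).take 9 =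
      c (3 * k) ++ (c (3 * k + 1) ++ c (3 * k + 2)) := by
  obtain ⟨m, rfl⟩ : ∃ m, n = 3 * k + (3 + m) := ⟨n - 3 * k - 3, by omega⟩
  rw [List.range_add, List.flatMap_append]
  have hlen : ((List.range (3 * k)).flatMap c).length = 9 * k := by
    rw [pvFlat_len c h]; simp; ring
  rw [← hlen, List.drop_left]
  rw [List.range_add, List.map_append, List.flatMap_append]
  have hr3 : ((List.range 3).map (fun x => 3 * k + x)).flatMap c =
      c (3 * k) ++ (c (3 * k + 1) ++ c (3 * k + 2)) := by
    simp [List.range_succ]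
  rw [hr3]
  have hlen9 : (c (3 * k) ++ (c (3 * k + 1) ++ c (3 * k + 2))).length = 9 := by
    simp [h]
  rw [← hlen9, List.take_left]

-- B's result equals the same chunk list
lemma pvB_eval (quarter : List (List Int)) :
    get_quarter_blocks_alt quarter =
      (List.range (quarter.length / 3)).map (pvBlock (pvCol quarter)) := by
  unfold get_quarter_blocks_alt
  dsimp only
  set n := quarter.length with hn
  have hflat : (PySem.List.pyRange 0 (n : Int) 1).foldl
      (fun acc i => acc ++ (PySem.List.pyRange 0 3 1).map
        (fun j => (PySem.List.pyGet? ((PySem.List.pyGet? quarter j).getD []) i).getD 0)) [] =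
      (List.range n).flatMap (fun t : Nat => pvCol quarter (t : Int)) := by
    have h1 : ∀ (acc : List Int), ∀ i ∈ PySem.List.pyRange 0 (n : Int) 1,
        acc ++ (PySem.List.pyRange 0 3 1).map
          (fun j => (PySem.List.pyGet? ((PySem.List.pyGet? quarter j).getD []) i).getD 0) =
        acc ++ pvCol quarter i := by
      intro acc i _
      simp [pvRange3, pvCol, pvElem]
    rw [PySem.List.foldl_congr_mem _ _ _ _ h1, PySem.List.foldl_append_eq_flatMap,
        List.nil_append, PySem.List.pyRange_zero_natCast, List.flatMap_map]
  rw [hflat]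
  set c : Nat → List Int := fun t : Nat => pvCol quarter (t : Int) with hc
  have hcl : ∀ i, (c i).length = 3 := by intro i; simp [hc, pvCol]
  set flat := (List.range n).flatMap c with hflatdef
  have hL : flat.length = 3 * n := pvFlat_len c hcl _ |>.trans (by simp)
  rw [hL]
  rw [PySem.List.pyRange_of_pos 0 ((3 * n : Nat) : Int) (by norm_num)]
  rw [PySem.List.foldl_append_ite, List.nil_append, List.filter_map]
  set C := (if (0 : Int) < ((3 * n : Nat) : Int) then
      ((((3 * n : Nat) : Int) - 0 + 9 - 1) / 9).toNat else 0) with hC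
  have hCval : C = (n + 2) / 3 := by
    rcases Nat.eq_zero_or_pos n with h0 | h0
    · simp [hC, h0]
    · rw [hC, if_pos (by exact_mod_cast (by omega : (0 : Int) < (3 * n : Nat))),
          show (((3 * n : Nat) : Int) - 0 + 9 - 1) = ((3 * n + 8 : Nat) : Int) by push_cast; ring,
          show (9 : Int) = ((9 : Nat) : Int) by norm_num, ← Int.natCast_ediv, Int.toNat_natCast]
      omega
  rw [hCval]
  have hfilter : (List.range ((n + 2) / 3)).filter
      ((fun x => decide (x + 9 ≤ ((3 * n : Nat) : Int))) ∘ fun k : Nat => 0 + 9 * (k : Int)) =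
      List.range (n / 3) := by
    obtain ⟨d, hd⟩ : ∃ d, (n + 2) / 3 = n / 3 + d := ⟨(n + 2) / 3 - n / 3, by omega⟩
    rw [hd, List.range_add, List.filter_append]
    have h1 : (List.range (n / 3)).filter
        ((fun x => decide (x + 9 ≤ ((3 * n : Nat) : Int))) ∘ fun k : Nat => 0 + 9 * (k : Int)) =
        List.range (n / 3) := by
      apply List.filter_eq_self.mpr
      intro a ha
      have := List.mem_range.mp ha
      simp only [Function.comp, decide_eq_true_eq]
      push_cast
      omega
    have h2 : ((List.range d).map (fun x => n / 3 + x)).filter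
        ((fun x => decide (x + 9 ≤ ((3 * n : Nat) : Int))) ∘ fun k : Nat => 0 + 9 * (k : Int)) =
        [] := by
      apply List.filter_eq_nil_iff.mpr
      intro a ha
      obtain ⟨x, -, rfl⟩ := List.mem_map.mp ha
      simp only [Function.comp, decide_eq_true_eq]
      push_cast
      omega
    rw [h1, h2, List.append_nil]
  rw [hfilter, List.map_map]
  apply List.map_congr_left
  intro k hk
  have hk3 : 3 * (k + 1) ≤ n := by
    have := List.mem_range.mp hk
    omega
  simp only [Function.comp]
  have e1 : ((0 : Int) + 9 * (k : Int)) = ((9 * k : Nat) : Int) := by push_cast; ring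
  rw [e1, show (9 : Int) = ((9 : Nat) : Int) by norm_num,
      PySem.List.slice_natCast_add flat (9 * k) 9, hflatdef,
      pvChunk c hcl n k hk3]
  rfl

-- ===== VERDICT (by name: the statement is the Claim_ definition above) =====
theorem get_quarter_blocks_spec : Claim_equal_get_quarter_blocks := by
  intro quarter _ _
  unfold Spec_get_quarter_blocks
  rw [pvB_eval, pvA_norm, pvA_eval]
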